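-- pv_equiv track=rewrite | github.com/pypi-data/pypi-mirror-80 | packages/kinshipsim/kinshipsim-2020.8-py3-none-any.whl/kinshipsim/lib.py | __fix_snp
-- ===== SOURCE A (Python) =====
-- def __fix_snp(s: str) -> str:
--     """
--     Fix the syntax of the SNP strand by removing additional information which is not used.
--
--     :param str, s : One strand of a given SNP.
--
--     :return: str : The strand following the removal of additional information not relevant to the simulation.
--     """
--
--     valid = ["0", "1", "."]  # accepted values
--     if len(s) == 1 and s in valid:
--         snp = s
--     else:
--         spl = s.split(":")
--         if len(spl) > 1:
--             snp = __fix_snp(spl[0])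
--         else:
--             snp = "-1"  # i.e. to be removed
--
--     return snp
-- ===== SOURCE B (Python) =====
-- def __fix_snp(s: str) -> str:
--     head = s.split(":")[0]
--     return head if head in ("0", "1", ".") else "-1"
-- ===== Notes on version B (the rewrite author's own statement) =====
-- stated objective: simpler
-- what changed: Replaces A's recursive validate-or-split-and-retry structure with one direct expression: take the segment before the first colon and return it if it is one of '0','1','.', else '-1'.
import Mathlib
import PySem

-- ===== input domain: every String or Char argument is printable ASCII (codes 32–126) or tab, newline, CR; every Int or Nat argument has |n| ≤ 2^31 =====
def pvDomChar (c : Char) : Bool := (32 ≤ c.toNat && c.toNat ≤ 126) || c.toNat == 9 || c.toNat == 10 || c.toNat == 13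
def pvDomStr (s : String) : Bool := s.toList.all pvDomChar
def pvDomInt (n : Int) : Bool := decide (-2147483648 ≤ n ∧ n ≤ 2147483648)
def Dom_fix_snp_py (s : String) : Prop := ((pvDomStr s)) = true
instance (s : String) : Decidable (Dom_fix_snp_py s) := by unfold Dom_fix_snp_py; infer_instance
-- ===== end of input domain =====

-- B replaces A's recursive validate-or-split-and-retry with one direct guarded expression on the pre-first-colon segment (objective: simpler).

-- ===== PORT A =====
-- The lemmas below characterise PySem.Chars.splitOn on the separator [':'] and are cited by
-- the port's decreasing_by (pvDecr): the segment before the first ':' has no ':' while s has one.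
lemma pvGoAcc (sep : List Char) (fuel : Nat) : ∀ (l cur : List Char) (acc : List (List Char)),
    PySem.Chars.splitOn.go sep fuel l cur acc = acc.reverse ++ PySem.Chars.splitOn.go sep fuel l cur [] := by
  induction fuel with
  | zero => intro l cur acc; simp [PySem.Chars.splitOn.go]
  | succ n ih =>
    intro l cur acc
    cases l with
    | nil => simp [PySem.Chars.splitOn.go]
    | cons c rest =>
      by_cases h : sep.isPrefixOf (c :: rest) = true
      · simp only [PySem.Chars.splitOn.go, h]
        rw [ih _ [] (cur.reverse :: acc), ih _ [] [cur.reverse]]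
        simp
      · simp only [PySem.Chars.splitOn.go, h]
        exact ih rest (c :: cur) acc

lemma pvGoHead (fuel : Nat) : ∀ (l cur : List Char), l.length < fuel →
    ∃ rest, PySem.Chars.splitOn.go [':'] fuel l cur [] =
      (cur.reverse ++ l.takeWhile (fun c => !(c == ':'))) :: rest := by
  induction fuel with
  | zero => intro l cur h; omega
  | succ n ih =>
    intro l cur h
    cases l with
    | nil => exact ⟨[], by simp [PySem.Chars.splitOn.go]⟩
    | cons c rest =>
      by_cases hc : c = ':'
      · subst hc
        refine ⟨PySem.Chars.splitOn.go [':'] n (List.drop 1 (':' :: rest)) [] [], ?_⟩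
        simp only [PySem.Chars.splitOn.go, List.isPrefixOf, List.takeWhile]
        rw [pvGoAcc [':'] n _ [] [cur.reverse]]
        simp
      · have hlen : rest.length < n := by simpa using h
        obtain ⟨r, hr⟩ := ih rest (c :: cur) hlen
        have hpre : ([':'].isPrefixOf (c :: rest)) = false := by
          simp [List.isPrefixOf]
          exact fun h' => hc h'.symm
        refine ⟨r, ?_⟩
        simp only [PySem.Chars.splitOn.go, hpre]
        rw [hr]
        simp [hc]

lemma pvGoNoColon (fuel : Nat) : ∀ (l cur : List Char), ':' ∉ l → l.length < fuel →
    PySem.Chars.splitOn.go [':'] fuel l cur [] = [cur.reverse ++ l] := by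
  induction fuel with
  | zero => intro l cur _ h; omega
  | succ n ih =>
    intro l cur hm h
    cases l with
    | nil => simp [PySem.Chars.splitOn.go]
    | cons c rest =>
      have hc : c ≠ ':' := fun h' => hm (h' ▸ List.mem_cons_self ..)
      have hpre : ([':'].isPrefixOf (c :: rest)) = false := by
        simp [List.isPrefixOf]
        exact fun h' => hc h'.symm
      simp only [PySem.Chars.splitOn.go, hpre]
      rw [ih rest (c :: cur) (fun hmem => hm (List.mem_cons_of_mem _ hmem)) (by simpa using h)]
      simp

lemma pvSplitHead (cs : List Char) :
    ∃ rest, PySem.Chars.splitOn cs [':'] = (cs.takeWhile (fun c => !(c == ':'))) :: rest := by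
  simpa [PySem.Chars.splitOn] using pvGoHead (cs.length + 1) cs [] (by omega)

lemma pvSplitNoColon (cs : List Char) (h : ':' ∉ cs) :
    PySem.Chars.splitOn cs [':'] = [cs] := by
  simpa [PySem.Chars.splitOn] using pvGoNoColon (cs.length + 1) cs [] h (by omega)

lemma pvSplitEq (s : String) :
    PySem.Str.split? s ":" = some ((PySem.Chars.splitOn s.toList [':']).map String.ofList) := by
  simp [PySem.Str.split?, PySem.Chars.split?]

lemma pvDecr (s : String) (h : 1 < ((PySem.Str.split? s ":").getD []).length) :
    (((PySem.List.pyGet? ((PySem.Str.split? s ":").getD []) 0).getD "").toList.count ':')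
      < s.toList.count ':' := by
  obtain ⟨rest, hF⟩ := pvSplitHead s.toList
  have hcolon : ':' ∈ s.toList := by
    by_contra hnc
    rw [pvSplitEq, Option.getD_some, pvSplitNoColon s.toList hnc] at h
    simp at h
  have hzero :
      ((String.ofList (s.toList.takeWhile (fun c => !(c == ':')))).toList.count ':') = 0 := by
    rw [List.count_eq_zero]
    intro hmem
    simp only [String.toList_ofList] at hmem
    have := List.mem_takeWhile_imp hmem
    simp at this
  rw [pvSplitEq, Option.getD_some, hF]
  simp only [List.map_cons, PySem.List.pyGet?, PySem.List.pyIdx?]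
  simp only [String.toList_ofList] at hzero
  simp [hzero]
  exact hcolon

def fix_snp_py (s : String) : String :=
  let valid : List String := ["0", "1", "."]
  if PySem.Str.len s == 1 && valid.contains s then
    s
  else
    -- s.split(":") is always `some …` since the separator ":" is nonempty
    let spl := (PySem.Str.split? s ":").getD []
    if spl.length > 1 then
      -- spl[0] is in range since spl.length > 1
      fix_snp_py ((PySem.List.pyGet? spl 0).getD "")
    else
      "-1"
termination_by s.toList.count ':'
decreasing_by exact pvDecr s (by omega)

-- ===== PORT B =====
def fix_snp_py_alt (s : String) : String :=
  -- head = s.split(":")[0]  (the split list is always nonempty; ":" is a nonempty separator)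
  let head := ((PySem.Str.split? s ":").getD []).headD ""
  if head == "0" || head == "1" || head == "." then head else "-1"

-- ===== PRECONDITION & SPEC =====
def Spec_fix_snp_py (s : String) (out : String) : Prop := out = fix_snp_py_alt s
instance (s : String) (out : String) : Decidable (Spec_fix_snp_py s out) := by unfold Spec_fix_snp_py; infer_instance

-- ===== CLAIM (what is proved, stated in full; the proofs are below) =====
def Claim_equal_fix_snp_py : Prop := ∀ (s : String), Dom_fix_snp_py s → Spec_fix_snp_py s (fix_snp_py s)

-- ===== LEMMAS AND PROOFS =====
lemma pvGoColonLen (fuel : Nat) : ∀ (l cur : List Char), ':' ∈ l → l.length < fuel →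
    2 ≤ (PySem.Chars.splitOn.go [':'] fuel l cur []).length := by
  induction fuel with
  | zero => intro l cur _ h; omega
  | succ n ih =>
    intro l cur hm h
    cases l with
    | nil => simp at hm
    | cons c rest =>
      by_cases hc : c = ':'
      · subst hc
        simp only [PySem.Chars.splitOn.go, List.isPrefixOf]
        rw [pvGoAcc [':'] n _ [] [cur.reverse]]
        obtain ⟨r, hr⟩ := pvGoHead n (List.drop 1 (':' :: rest)) [] (by simpa using h)
        simp only [List.drop_succ_cons, List.drop_zero] at hr
        simp [hr]
      · have hrest : ':' ∈ rest := by
          rcases List.mem_cons.mp hm with h' | h'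
          · exact absurd h'.symm hc
          · exact h'
        have hpre : ([':'].isPrefixOf (c :: rest)) = false := by
          simp [List.isPrefixOf]
          exact fun h' => hc h'.symm
        simp only [PySem.Chars.splitOn.go, hpre]
        exact ih rest (c :: cur) hrest (by simpa using h)

lemma pvSplitColon (cs : List Char) (h : ':' ∈ cs) :
    2 ≤ (PySem.Chars.splitOn cs [':']).length := by
  simpa [PySem.Chars.splitOn] using pvGoColonLen (cs.length + 1) cs [] h (by omega)

lemma pvCondEq (s : String) :
    ((PySem.Str.len s == 1) && (["0", "1", "."] : List String).contains s)
      = (s == "0" || s == "1" || s == ".") := by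
  by_cases h0 : s = "0"
  · subst h0; decide
  · by_cases h1 : s = "1"
    · subst h1; decide
    · by_cases h2 : s = "."
      · subst h2; decide
      · have f0 : (s == "0") = false := beq_eq_false_iff_ne.mpr h0
        have f1 : (s == "1") = false := beq_eq_false_iff_ne.mpr h1
        have f2 : (s == ".") = false := beq_eq_false_iff_ne.mpr h2
        simp only [List.contains_cons, List.contains_nil, f0, f1, f2, Bool.or_false, Bool.and_false]

lemma pvNoColonEval (s : String) (h : ':' ∉ s.toList) :
    fix_snp_py s = if (s == "0" || s == "1" || s == ".") then s else "-1" := by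
  rw [fix_snp_py, pvCondEq]
  cases hv : (s == "0" || s == "1" || s == ".") with
  | true => simp
  | false =>
    simp only [Bool.false_eq_true, if_false]
    rw [pvSplitEq]
    simp [pvSplitNoColon s.toList h]

theorem pvAgree (s : String) : fix_snp_py s = fix_snp_py_alt s := by
  by_cases hc : ':' ∈ s.toList
  · -- A recurses once on the pre-colon segment; B inspects that same segment directly
    have hvfalse : (s == "0" || s == "1" || s == ".") = false := by
      rcases hq : (s == "0" || s == "1" || s == ".") with _ | _
      · rfl
      · exfalso
        rcases (by simpa using hq : (s = "0" ∨ s = "1") ∨ s = ".") with (h | h) | h <;>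
          (subst h; exact absurd hc (by decide))
    obtain ⟨rest, hF⟩ := pvSplitHead s.toList
    have hlen := pvSplitColon s.toList hc
    rw [fix_snp_py, pvCondEq, hvfalse]
    simp only [Bool.false_eq_true, if_false]
    rw [pvSplitEq, Option.getD_some]
    have hlen2 : 1 < ((PySem.Chars.splitOn s.toList [':']).map String.ofList).length := by
      simpa using hlen
    rw [if_pos hlen2]
    have hhead :
        (PySem.List.pyGet? ((PySem.Chars.splitOn s.toList [':']).map String.ofList) 0).getD ""
          = String.ofList (s.toList.takeWhile (fun c => !(c == ':'))) := by
      rw [hF]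
      simp [PySem.List.pyGet?, PySem.List.pyIdx?]
    rw [hhead]
    have hnc : ':' ∉ (String.ofList (s.toList.takeWhile (fun c => !(c == ':')))).toList := by
      simp only [String.toList_ofList]
      intro hmem
      have := List.mem_takeWhile_imp hmem
      simp at this
    rw [pvNoColonEval _ hnc]
    unfold fix_snp_py_alt
    rw [pvSplitEq, Option.getD_some, hF]
    simp
  · -- no colon: both sides reduce to the same guarded expression on s itself
    rw [pvNoColonEval s hc]
    unfold fix_snp_py_alt
    rw [pvSplitEq, Option.getD_some, pvSplitNoColon s.toList hc]
    simp

-- ===== VERDICT (by name: the statement is the Claim_ definition above) =====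
theorem fix_snp_py_spec : Claim_equal_fix_snp_py := by
  intro s _
  unfold Spec_fix_snp_py
  exact pvAgree s
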